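-- pv_equiv track=rewrite | github.com/vfioexperte/wine_hardened_script | Code/Lxc/lxc.py | lxc_converter_docker_array_reading
-- ===== SOURCE A (Python) =====
-- def lxc_converter_docker_array_reading(args):
--     paths = [];
--     paths2 = [];
--     devices = [];
--     variable = [];
--     for i in range(len(args)):
--         tmp = args[i];
--         if(tmp == "-v"):
--             paths.append(args[i+1]);
--             i = i +1;
--             continue;
--         if(tmp == "-v2"):
--             paths2.append(args[i+1]);
--             i = i +1;
--             continue;
--         if(tmp == "--device"):
--             devices.append(args[i+1]);
--             #paths.append(args[i+1]);
--             i = i +1;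
--             continue;
--         if(tmp == "-e"):
--             variable.append(args[i+1]);
--             i = i +1;
--             continue;
--     return [paths, variable, paths2, devices];
-- ===== SOURCE B (Python) =====
-- def lxc_converter_docker_array_reading(args):
--     return [[args[i + 1] for i in range(len(args)) if args[i] == flag]
--             for flag in ("-v", "-e", "-v2", "--device")]
-- ===== Notes on version B (the rewrite author's own statement) =====
-- stated objective: simpler
-- what changed: Replaces the single branch-dispatching accumulator loop with four independent guarded comprehensions, one per flag, returned directly as the four output lists.
import Mathlib
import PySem

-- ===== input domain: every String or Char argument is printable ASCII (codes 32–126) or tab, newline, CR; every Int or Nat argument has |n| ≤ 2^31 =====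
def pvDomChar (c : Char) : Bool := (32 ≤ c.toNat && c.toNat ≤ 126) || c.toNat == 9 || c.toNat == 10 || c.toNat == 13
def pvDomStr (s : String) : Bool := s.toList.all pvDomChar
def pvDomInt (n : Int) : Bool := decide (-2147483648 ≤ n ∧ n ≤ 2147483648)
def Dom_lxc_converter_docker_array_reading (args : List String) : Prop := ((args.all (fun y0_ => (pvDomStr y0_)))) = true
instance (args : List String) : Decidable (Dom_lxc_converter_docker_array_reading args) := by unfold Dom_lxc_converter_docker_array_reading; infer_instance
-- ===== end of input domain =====

-- B replaces A's single branch-dispatching loop with four independent guarded scans (one per flag); objective: simpler.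


-- ===== PORT A =====
-- one loop step of A; args[i+1] is read with getD "": under Pre_ the index is always in range (Python would raise IndexError exactly where Pre_ fails)
def pvStepA (args : List String)
    (s : List String × List String × List String × List String) (i : Nat) :
    List String × List String × List String × List String :=
  let tmp := args.getD i ""
  if tmp = "-v" then (s.1 ++ [args.getD (i+1) ""], s.2.1, s.2.2.1, s.2.2.2)
  else if tmp = "-v2" then (s.1, s.2.1 ++ [args.getD (i+1) ""], s.2.2.1, s.2.2.2)
  else if tmp = "--device" then (s.1, s.2.1, s.2.2.1 ++ [args.getD (i+1) ""], s.2.2.2)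
  else if tmp = "-e" then (s.1, s.2.1, s.2.2.1, s.2.2.2 ++ [args.getD (i+1) ""])
  else s

def lxc_converter_docker_array_reading (args : List String) : List (List String) :=
  let r := (List.range args.length).foldl (pvStepA args) ([], [], [], [])
  [r.1, r.2.2.2, r.2.1, r.2.2.1]   -- [paths, variable, paths2, devices]

-- ===== PORT B =====
-- one guarded comprehension: [args[i+1] for i in range(len(args)) if args[i] == flag]
def pvGrab (args : List String) (flag : String) : List String :=
  (List.range args.length).filterMap
    (fun i => if args.getD i "" = flag then some (args.getD (i+1) "") else none)

def lxc_converter_docker_array_reading_alt (args : List String) : List (List String) :=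
  ["-v", "-e", "-v2", "--device"].map (pvGrab args)

-- ===== PRECONDITION & SPEC =====
-- Pre_ excludes exactly the inputs where Python A raises IndexError: a non-empty args whose
-- last element is one of the four flags (the flag's value args[i+1] is read past the end).
def Pre_lxc_converter_docker_array_reading (args : List String) : Prop :=
  args.getLastD "" ∉ (["-v", "-e", "-v2", "--device"] : List String)
instance (args : List String) : Decidable (Pre_lxc_converter_docker_array_reading args) := by
  unfold Pre_lxc_converter_docker_array_reading; infer_instance

def pvWitness_lxc_converter_docker_array_reading : List String :=
  ["-v", "/a", "x", "-e", "K=V", "--device", "/dev/kvm"]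

def Spec_lxc_converter_docker_array_reading (args : List String) (out : List (List String)) : Prop :=
  out = lxc_converter_docker_array_reading_alt args
instance (args : List String) (out : List (List String)) : Decidable (Spec_lxc_converter_docker_array_reading args out) := by
  unfold Spec_lxc_converter_docker_array_reading; infer_instance

-- ===== CLAIM (what is proved, stated in full; the proofs are below) =====
def Claim_equal_lxc_converter_docker_array_reading : Prop :=
  ∀ (args : List String), Dom_lxc_converter_docker_array_reading args →
    Pre_lxc_converter_docker_array_reading args →
    Spec_lxc_converter_docker_array_reading args (lxc_converter_docker_array_reading args)

-- ===== LEMMAS AND PROOFS =====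

-- loop invariant: folding A's step over any index list appends, to each accumulator,
-- exactly the values B's per-flag comprehension collects over that index list.
theorem pvFold_eq (args : List String) (is : List Nat)
    (p p2 d v : List String) :
    is.foldl (pvStepA args) (p, p2, d, v) =
      (p ++ (is.filterMap (fun i => if args.getD i "" = "-v" then some (args.getD (i+1) "") else none)),
       p2 ++ (is.filterMap (fun i => if args.getD i "" = "-v2" then some (args.getD (i+1) "") else none)),
       d ++ (is.filterMap (fun i => if args.getD i "" = "--device" then some (args.getD (i+1) "") else none)),
       v ++ (is.filterMap (fun i => if args.getD i "" = "-e" then some (args.getD (i+1) "") else none))) := by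
  induction is generalizing p p2 d v with
  | nil => simp
  | cons i is ih =>
    by_cases h1 : args[i]?.getD "" = "-v"
    · simp [List.foldl_cons, pvStepA, h1, ih]
    · by_cases h2 : args[i]?.getD "" = "-v2"
      · simp [List.foldl_cons, pvStepA, h2, ih]
      · by_cases h3 : args[i]?.getD "" = "--device"
        · simp [List.foldl_cons, pvStepA, h3, ih]
        · by_cases h4 : args[i]?.getD "" = "-e"
          · simp [List.foldl_cons, pvStepA, h4, ih]
          · simp [List.foldl_cons, pvStepA, h1, h2, h3, h4, ih]

theorem lxc_eq (args : List String) :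
    lxc_converter_docker_array_reading args = lxc_converter_docker_array_reading_alt args := by
  unfold lxc_converter_docker_array_reading lxc_converter_docker_array_reading_alt pvGrab
  rw [pvFold_eq]
  simp

-- ===== VERDICT (by name: the statement is the Claim_ definition above) =====
theorem lxc_converter_docker_array_reading_spec : Claim_equal_lxc_converter_docker_array_reading := by
  intro args _ _
  exact lxc_eq args
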